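-- pv_equiv track=rewrite | github.com/yosato/kevin_kansai | data_process/split_longsents.py | split_longsent
-- ===== SOURCE A (Python) =====
-- def split_longsent(Str,Thr,Puncts):
--     NumDivs=(len(Str)//Thr)+1
--     PunctCnt=len([ Char for Char in Str if Char in Puncts])
--     UnitCnt=(PunctCnt//NumDivs)+1
--     UnitCnts=[ UnitCnt*NumDiv for NumDiv in range(1,NumDivs) ]
--     PunctCntr=0
--     NewStr=''
--     for Char in Str:
--         if Char not in Puncts:
--             NewStr+=Char
--         else:
--             PunctCntr+=1
--             if PunctCntr not in UnitCnts:
--                 NewStr+=Char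
--             else:
--                 NewStr+=Char+'\n'
--     return NewStr
-- ===== SOURCE B (Python) =====
-- def split_longsent(Str, Thr, Puncts):
--     NumDivs = (len(Str)//Thr) + 1
--     pos = [i for i, ch in enumerate(Str) if ch in Puncts]
--     cuts = []
--     if NumDivs > 1:
--         UnitCnt = (len(pos)//NumDivs) + 1
--         cuts = [p + 1 for j, p in enumerate(pos)
--                 if (j + 1) % UnitCnt == 0 and (j + 1)//UnitCnt < NumDivs]
--     pieces = []
--     prev = 0
--     for c in cuts:
--         pieces.append(Str[prev:c])
--         prev = c
--     pieces.append(Str[prev:])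
--     return '\n'.join(pieces)
-- ===== Notes on version B (the rewrite author's own statement) =====
-- stated objective: alternative
-- what changed: B replaces A's char-by-char loop with a running punctuation counter and a membership test against a precomputed multiples list by an index-first pass: it collects the string indices of all punctuation once, computes the cut positions from the ordinals k*UnitCnt directly, and rebuilds the result by slicing the string between consecutive cuts and joining with newlines.
import Mathlib
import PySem

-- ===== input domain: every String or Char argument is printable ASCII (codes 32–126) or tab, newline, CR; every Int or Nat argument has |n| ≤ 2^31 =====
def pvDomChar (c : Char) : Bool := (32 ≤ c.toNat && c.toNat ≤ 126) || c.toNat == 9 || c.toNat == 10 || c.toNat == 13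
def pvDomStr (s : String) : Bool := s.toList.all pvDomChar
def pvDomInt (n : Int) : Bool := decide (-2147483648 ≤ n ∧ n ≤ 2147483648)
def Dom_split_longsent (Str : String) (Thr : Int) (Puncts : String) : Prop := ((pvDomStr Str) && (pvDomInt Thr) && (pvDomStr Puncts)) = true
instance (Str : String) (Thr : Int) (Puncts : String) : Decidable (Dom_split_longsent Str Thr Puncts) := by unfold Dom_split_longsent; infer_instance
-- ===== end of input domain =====

-- B rebuilds the sentence by slicing between precomputed punctuation-cut indices and joining with newlines,
-- instead of A's char-by-char loop with a running counter; objective: alternative (same cost, index-first decomposition).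


-- ===== PORT A =====
-- 'Char in Puncts' for a single character: membership of the character in the string
def pvIn (Puncts : String) (c : Char) : Bool := Puncts.toList.contains c

def split_longsent (Str : String) (Thr : Int) (Puncts : String) : String :=
  let cs := Str.toList
  let NumDivs : Int := PySem.Int.floordiv (cs.length : Int) Thr + 1
  let PunctCnt : Int := ((cs.filter (fun c => pvIn Puncts c)).length : Int)
  let UnitCnt : Int := PySem.Int.floordiv PunctCnt NumDivs + 1
  let UnitCnts : List Int := (PySem.List.pyRange 1 NumDivs).map (fun k => UnitCnt * k)
  let st := cs.foldl (fun (st : Int × List Char) c =>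
      if !(pvIn Puncts c) then (st.1, st.2 ++ [c])
      else if !(UnitCnts.contains (st.1 + 1)) then (st.1 + 1, st.2 ++ [c])
      else (st.1 + 1, st.2 ++ [c, '\n'])) ((0 : Int), ([] : List Char))
  String.ofList st.2

-- ===== PORT B =====
def split_longsent_alt (Str : String) (Thr : Int) (Puncts : String) : String :=
  let cs := Str.toList
  let NumDivs : Int := PySem.Int.floordiv (cs.length : Int) Thr + 1
  let pos : List Int := ((PySem.List.enumerate cs).filter (fun t => pvIn Puncts t.2)).map (fun t => t.1)
  let cuts : List Int :=
    if NumDivs > 1 then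
      let UnitCnt : Int := PySem.Int.floordiv ((pos.length : Int)) NumDivs + 1
      ((PySem.List.enumerate pos).filter (fun t =>
          PySem.Int.mod (t.1 + 1) UnitCnt == 0 && decide (PySem.Int.floordiv (t.1 + 1) UnitCnt < NumDivs))).map
        (fun t => t.2 + 1)
    else []
  let st := cuts.foldl (fun (st : Int × List (List Char)) c =>
      (c, st.2 ++ [PySem.List.slice cs (some st.1) (some c)])) ((0 : Int), ([] : List (List Char)))
  let pieces := st.2 ++ [PySem.List.slice cs (some st.1) none]
  String.ofList (PySem.Chars.join ['\n'] pieces)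

-- ===== PRECONDITION & SPEC =====
-- Pre_ excludes exactly the inputs where Python A raises ZeroDivisionError: Thr = 0, or (len(Str)//Thr)+1 = 0.
def Pre_split_longsent (Str : String) (Thr : Int) (Puncts : String) : Prop :=
  Thr ≠ 0 ∧ PySem.Int.floordiv ((Str.toList.length : Int)) Thr + 1 ≠ 0
instance (Str : String) (Thr : Int) (Puncts : String) : Decidable (Pre_split_longsent Str Thr Puncts) := by unfold Pre_split_longsent; infer_instance

def pvWitness_split_longsent : String × Int × String := ("ab, cd. ef", 3, ".,")

def Spec_split_longsent (Str : String) (Thr : Int) (Puncts : String) (out : String) : Prop := out = split_longsent_alt Str Thr Puncts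
instance (Str : String) (Thr : Int) (Puncts : String) (out : String) : Decidable (Spec_split_longsent Str Thr Puncts out) := by unfold Spec_split_longsent; infer_instance

-- ===== CLAIM (what is proved, stated in full; the proofs are below) =====
def Claim_equal_split_longsent : Prop := ∀ (Str : String) (Thr : Int) (Puncts : String), Dom_split_longsent Str Thr Puncts → Pre_split_longsent Str Thr Puncts → Spec_split_longsent Str Thr Puncts (split_longsent Str Thr Puncts)
-- ===== LEMMAS AND PROOFS =====

-- A's loop, as a structural recursion: q tests the running punctuation ordinal.
def runA (p : Char → Bool) (q : Int → Bool) : List Char → Int → List Char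
  | [], _ => []
  | c :: cs, n =>
    if p c then
      (if q (n + 1) then c :: '\n' :: runA p q cs (n + 1) else c :: runA p q cs (n + 1))
    else c :: runA p q cs n

-- positions (0-based) of the punctuation characters
def posL (p : Char → Bool) : List Char → List Int
  | [] => []
  | c :: cs => if p c then 0 :: (posL p cs).map (· + 1) else (posL p cs).map (· + 1)

-- B's cut positions (each = punctuation index + 1), as a structural recursion over the characters
def runCuts (p : Char → Bool) (q : Int → Bool) : List Char → Int → List Int
  | [], _ => []
  | c :: cs, n =>
    if p c then
      (if q (n + 1) then 1 :: (runCuts p q cs (n + 1)).map (· + 1)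
       else (runCuts p q cs (n + 1)).map (· + 1))
    else (runCuts p q cs n).map (· + 1)

-- the joined result of slicing at relative cut positions
def Jrel : List Char → List Int → List Char
  | cs, [] => cs
  | cs, k :: r => cs.take k.toNat ++ '\n' :: Jrel (cs.drop k.toNat) (r.map (· - k))
  termination_by _ cuts => cuts.length
  decreasing_by simp

-- the pieces B's final loop accumulates, from absolute position prev
def bpieces (cs : List Char) : Int → List Int → List (List Char)
  | prev, [] => [PySem.List.slice cs (some prev) none]
  | prev, k :: r => PySem.List.slice cs (some prev) (some k) :: bpieces cs k r

theorem A_fold (p : Char → Bool) (us : List Int) (cs : List Char) : ∀ (n : Int) (acc : List Char),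
    (cs.foldl (fun (st : Int × List Char) c =>
        if !(p c) then (st.1, st.2 ++ [c])
        else if !(us.contains (st.1 + 1)) then (st.1 + 1, st.2 ++ [c])
        else (st.1 + 1, st.2 ++ [c, '\n'])) (n, acc)).2
      = acc ++ runA p (fun m => us.contains m) cs n := by
  induction cs with
  | nil => intro n acc; simp [runA]
  | cons c cs ih =>
    intro n acc
    rw [List.foldl_cons]
    by_cases hc : p c
    · by_cases hq : us.contains (n + 1)
      · have hq' : n + 1 ∈ us := by simpa using hq
        rw [if_neg (show ¬((!p c) = true) by simp [hc]),
            if_neg (show ¬((!us.contains (n + 1)) = true) by simpa using hq), ih]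
        simp [runA, hc, hq']
      · have hq' : n + 1 ∉ us := by simpa using hq
        rw [if_neg (show ¬((!p c) = true) by simp [hc]),
            if_pos (show (!us.contains (n + 1)) = true by simpa using hq), ih]
        simp [runA, hc, hq']
    · rw [if_pos (show (!p c) = true by simp [hc]), ih]
      simp [runA, hc]

theorem pos_eq (p : Char → Bool) (cs : List Char) : ∀ (s : Int),
    ((PySem.List.enumerate cs s).filter (fun t => p t.2)).map (fun t => t.1) = (posL p cs).map (· + s) := by
  induction cs with
  | nil => intro s; simp [posL, PySem.List.enumerate_nil]
  | cons c cs ih =>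
    intro s
    by_cases hc : p c
    · simp only [PySem.List.enumerate_cons, List.filter_cons, hc, if_pos, posL]
      simp only [List.map_cons, ih (s + 1), List.map_map]
      congr 1
      · omega
      · congr 1; funext x; simp only [Function.comp_apply]; omega
    · simp only [PySem.List.enumerate_cons, List.filter_cons, hc, posL]
      simp only [Bool.false_eq_true, if_false, ih (s + 1), List.map_map]
      congr 1; funext x; simp only [Function.comp_apply]; omega

theorem enumerate_map_add (vs : List Int) : ∀ (s d : Int),
    PySem.List.enumerate (vs.map (· + d)) s = (PySem.List.enumerate vs s).map (fun t => (t.1, t.2 + d)) := by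
  induction vs with
  | nil => intro s d; simp [PySem.List.enumerate_nil]
  | cons v vs ih => intro s d; simp [PySem.List.enumerate_cons, ih]

theorem cuts_eq (p : Char → Bool) (q : Int → Bool) (cs : List Char) : ∀ (n : Int),
    ((PySem.List.enumerate (posL p cs) n).filter (fun t => q (t.1 + 1))).map (fun t => t.2 + 1)
      = runCuts p q cs n := by
  induction cs with
  | nil => intro n; simp [posL, runCuts, PySem.List.enumerate_nil]
  | cons c cs ih =>
    intro n
    have hcomp : ((fun t : Int × Int => q (t.1 + 1)) ∘ (fun t : Int × Int => (t.1, t.2 + 1)))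
        = fun t : Int × Int => q (t.1 + 1) := by
      funext t; simp
    by_cases hc : p c
    · simp only [posL, hc, if_pos, runCuts, PySem.List.enumerate_cons,
        enumerate_map_add, List.filter_map, List.filter_cons, hcomp]
      by_cases hq : q (n + 1)
      · simp only [hq, if_pos, List.map_cons, List.map_map, ← ih (n + 1)]
        rfl
      · simp only [hq, Bool.false_eq_true, if_false, List.map_map, ← ih (n + 1)]
        rfl
    · simp only [posL, hc, Bool.false_eq_true, if_false, runCuts,
        enumerate_map_add, List.filter_map, hcomp, List.map_map, ← ih n]
      rfl

theorem runCuts_pos (p : Char → Bool) (q : Int → Bool) (cs : List Char) : ∀ (n : Int) (x : Int),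
    x ∈ runCuts p q cs n → 1 ≤ x := by
  induction cs with
  | nil => intro n x h; simp [runCuts] at h
  | cons c cs ih =>
    intro n x h
    by_cases hc : p c
    · by_cases hq : q (n + 1)
      · simp only [runCuts, hc, hq, if_pos, List.mem_cons, List.mem_map] at h
        rcases h with h | ⟨y, hy, rfl⟩
        · omega
        · have := ih (n + 1) y hy; omega
      · simp only [runCuts, hc, hq, if_pos, Bool.false_eq_true, if_false, List.mem_map] at h
        rcases h with ⟨y, hy, rfl⟩
        have := ih (n + 1) y hy; omega
    · simp only [runCuts, hc, Bool.false_eq_true, if_false, List.mem_map] at h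
      rcases h with ⟨y, hy, rfl⟩
      have := ih n y hy; omega

theorem runCuts_pairwise (p : Char → Bool) (q : Int → Bool) (cs : List Char) : ∀ (n : Int),
    List.Pairwise (· ≤ ·) (runCuts p q cs n) := by
  induction cs with
  | nil => intro n; simp [runCuts]
  | cons c cs ih =>
    intro n
    have hmap : ∀ m : Int, List.Pairwise (· ≤ ·) ((runCuts p q cs m).map (· + 1)) := by
      intro m
      rw [List.pairwise_map]
      exact (ih m).imp (by intro a b hab; omega)
    by_cases hc : p c
    · by_cases hq : q (n + 1)
      · simp only [runCuts, hc, hq, if_pos]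
        refine List.pairwise_cons.mpr ⟨?_, hmap (n + 1)⟩
        intro y hy
        rcases List.mem_map.mp hy with ⟨x, hx, rfl⟩
        have := runCuts_pos p q cs (n + 1) x hx; omega
      · simp only [runCuts, hc, hq, if_pos, Bool.false_eq_true, if_false]
        exact hmap (n + 1)
    · simp only [runCuts, hc, Bool.false_eq_true, if_false]
      exact hmap n

theorem fold_pieces (cs : List Char) (cuts : List Int) : ∀ (prev : Int) (acc : List (List Char)),
    (cuts.foldl (fun (st : Int × List (List Char)) c =>
        (c, st.2 ++ [PySem.List.slice cs (some st.1) (some c)])) (prev, acc)).2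
      ++ [PySem.List.slice cs
            (some (cuts.foldl (fun (st : Int × List (List Char)) c =>
              (c, st.2 ++ [PySem.List.slice cs (some st.1) (some c)])) (prev, acc)).1) none]
      = acc ++ bpieces cs prev cuts := by
  induction cuts with
  | nil => intro prev acc; simp [bpieces]
  | cons k r ih => intro prev acc; simp [bpieces, ih]

theorem join_bpieces (cs : List Char) (cuts : List Int) : ∀ (prev : Int), 0 ≤ prev →
    (∀ x ∈ cuts, prev ≤ x) → List.Pairwise (· ≤ ·) cuts →
    PySem.Chars.join ['\n'] (bpieces cs prev cuts)
      = Jrel (cs.drop prev.toNat) (cuts.map (· - prev)) := by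
  induction cuts with
  | nil =>
    intro prev hprev _ _
    simp [bpieces, Jrel, PySem.Chars.join_singleton, PySem.List.slice_from cs hprev]
  | cons k r ih =>
    intro prev hprev hall hpw
    have hpk : prev ≤ k := hall k (by simp)
    rcases List.pairwise_cons.mp hpw with ⟨hkr, hpwr⟩
    have hk : (0 : Int) ≤ k := le_trans hprev hpk
    obtain ⟨y, ys, hy⟩ : ∃ y ys, bpieces cs k r = y :: ys := by
      cases r with
      | nil => exact ⟨_, _, rfl⟩
      | cons a b => exact ⟨_, _, rfl⟩
    show PySem.Chars.join ['\n'] (PySem.List.slice cs (some prev) (some k) :: bpieces cs k r) = _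
    rw [hy, PySem.Chars.join_cons_cons, ← hy, ih k hk hkr hpwr]
    have h1 : (k - prev).toNat = k.toNat - prev.toNat := by omega
    have h2 : prev.toNat + (k.toNat - prev.toNat) = k.toNat := by omega
    have h3 : (r.map (· - prev)).map (· - (k - prev)) = r.map (· - k) := by
      rw [List.map_map]; congr 1; funext x; simp only [Function.comp_apply]; omega
    simp only [List.map_cons, Jrel, h1, h3, List.drop_drop, h2,
      PySem.List.slice_toNat cs hprev hk, List.append_assoc, List.singleton_append]

theorem Jrel_shift (c : Char) (cs : List Char) (L : List Int) (h : ∀ x ∈ L, 0 ≤ x) :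
    Jrel (c :: cs) (L.map (· + 1)) = c :: Jrel cs L := by
  cases L with
  | nil => simp [Jrel]
  | cons k r =>
    have hk : (0 : Int) ≤ k := h k (by simp)
    have h1 : (k + 1).toNat = k.toNat + 1 := by omega
    have hfun : ((fun x : Int => x - (k + 1)) ∘ (· + 1)) = (fun x : Int => x - k) := by
      funext x; simp only [Function.comp_apply]; omega
    simp only [List.map_cons, Jrel, h1, List.take_succ_cons, List.drop_succ_cons, List.map_map,
      hfun, List.cons_append]

theorem main_M (p : Char → Bool) (q : Int → Bool) (cs : List Char) : ∀ (n : Int),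
    Jrel cs (runCuts p q cs n) = runA p q cs n := by
  induction cs with
  | nil => intro n; simp [runCuts, runA, Jrel]
  | cons c cs ih =>
    intro n
    have hpos : ∀ (m : Int), ∀ x ∈ runCuts p q cs m, (0 : Int) ≤ x := by
      intro m x hx; have := runCuts_pos p q cs m x hx; omega
    by_cases hc : p c
    · by_cases hq : q (n + 1)
      · rw [runCuts, if_pos hc, if_pos hq, runA, if_pos hc, if_pos hq]
        have hfun : ((fun x : Int => x - 1) ∘ (· + 1)) = (fun x : Int => x) := by
          funext x; simp only [Function.comp_apply]; omega
        show Jrel (c :: cs) ((1 : Int) :: (runCuts p q cs (n + 1)).map (· + 1)) = _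
        simp only [Jrel, Int.toNat_one, List.take_succ_cons, List.take_zero,
          List.drop_succ_cons, List.drop_zero, List.map_map, hfun, List.map_id', ih (n + 1)]
        simp
      · rw [runCuts, if_pos hc, if_neg (by simp [hq]), runA, if_pos hc, if_neg (by simp [hq])]
        rw [Jrel_shift c cs _ (hpos (n + 1)), ih (n + 1)]
    · rw [runCuts, if_neg (by simp [hc]), runA, if_neg (by simp [hc])]
      rw [Jrel_shift c cs _ (hpos n), ih n]

theorem runA_congr (p : Char → Bool) (q1 q2 : Int → Bool) (cs : List Char) : ∀ (n : Int),
    (∀ m, n < m → q1 m = q2 m) → runA p q1 cs n = runA p q2 cs n := by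
  induction cs with
  | nil => intro n _; simp [runA]
  | cons c cs ih =>
    intro n h
    by_cases hc : p c
    · rw [runA, runA, if_pos hc, if_pos hc, h (n + 1) (by omega),
        ih (n + 1) (fun m hm => h m (by omega))]
    · rw [runA, runA, if_neg (by simp [hc]), if_neg (by simp [hc]), ih n h]

theorem runA_false (p : Char → Bool) (q : Int → Bool) (h : ∀ m, q m = false) (cs : List Char) :
    ∀ (n : Int), runA p q cs n = cs := by
  induction cs with
  | nil => intro n; simp [runA]
  | cons c cs ih => intro n; by_cases hc : p c <;> simp [runA, hc, h, ih]

theorem posL_length (p : Char → Bool) (cs : List Char) : (posL p cs).length = (cs.filter p).length := by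
  induction cs with
  | nil => simp [posL]
  | cons c cs ih => by_cases hc : p c <;> simp [posL, hc, ih]

theorem qpoint (U ND m : Int) (hU : 0 < U) (hm : 0 < m) :
    ((PySem.Int.mod m U == 0) && decide (PySem.Int.floordiv m U < ND))
      = (((PySem.List.pyRange 1 ND).map (fun k => U * k)).contains m) := by
  have hfd : PySem.Int.floordiv m U = m / U := PySem.Int.floordiv_eq_ediv_of_pos hU
  rw [Bool.eq_iff_iff]
  simp only [Bool.and_eq_true, beq_iff_eq, decide_eq_true_eq, List.contains_iff_mem,
    List.mem_map, PySem.List.mem_pyRange_one]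
  constructor
  · rintro ⟨h0, hlt⟩
    obtain ⟨k, rfl⟩ := (PySem.Int.mod_eq_zero_iff_dvd m U).mp h0
    have hdivk : PySem.Int.floordiv (U * k) U = k := by
      rw [hfd]; exact Int.mul_ediv_cancel_left k (ne_of_gt hU)
    have hkpos : 0 < k := by nlinarith
    exact ⟨k, ⟨by omega, by rw [hdivk] at hlt; exact hlt⟩, rfl⟩
  · rintro ⟨k, ⟨hk1, hk2⟩, rfl⟩
    refine ⟨(PySem.Int.mod_eq_zero_iff_dvd _ _).mpr (dvd_mul_right U k), ?_⟩
    rw [hfd, Int.mul_ediv_cancel_left k (ne_of_gt hU)]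
    exact hk2

-- ===== VERDICT (by name: the statement is the Claim_ definition above) =====
theorem split_longsent_spec : Claim_equal_split_longsent := by
  intro S T P _ _
  unfold Spec_split_longsent split_longsent split_longsent_alt
  simp only []
  set cs := S.toList with hcs
  set p : Char → Bool := pvIn P with hp
  set ND : Int := PySem.Int.floordiv ((cs.length : Int)) T + 1 with hND
  rw [A_fold]
  have hpos : ((PySem.List.enumerate cs).filter (fun t => pvIn P t.2)).map (fun t => t.1)
      = posL p cs := by
    rw [pos_eq p cs 0]
    simp
  rw [hpos, posL_length, fold_pieces]
  set PC : Int := (((cs.filter (fun c => pvIn P c)).length : Int)) with hPC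
  have hPCeq : ((cs.filter p).length : Int) = PC := rfl
  have hPCpos : 0 ≤ PC := by rw [hPC]; positivity
  set U : Int := PySem.Int.floordiv PC ND + 1 with hU
  by_cases hnd : 1 < ND
  · rw [if_pos hnd]
    set qB : Int → Bool := fun m =>
      PySem.Int.mod m U == 0 && decide (PySem.Int.floordiv m U < ND) with hqB
    rw [cuts_eq p qB cs 0]
    simp only [List.nil_append]
    rw [join_bpieces cs _ 0 (le_refl 0)
        (fun x hx => by have := runCuts_pos p qB cs 0 x hx; omega)
        (runCuts_pairwise p qB cs 0)]
    have hmapid : (runCuts p qB cs 0).map (fun x => x - (0 : Int)) = runCuts p qB cs 0 := by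
      simp
    simp only [Int.toNat_zero, List.drop_zero]
    rw [hmapid, main_M p qB cs 0]
    have hUpos : 0 < U := by
      have : (0 : Int) ≤ PySem.Int.floordiv PC ND := by
        rw [PySem.Int.floordiv_eq_ediv_of_pos (by omega : (0:Int) < ND)]
        exact Int.ediv_nonneg hPCpos (by omega)
      omega
    rw [runA_congr p (fun m => (((PySem.List.pyRange 1 ND).map (fun k => U * k)).contains m)) qB cs 0
      (fun m hm => (qpoint U ND m hUpos hm).symm)]
  · rw [if_neg hnd]
    have hfalse : ∀ m : Int, (((PySem.List.pyRange 1 ND).map (fun k => U * k)).contains m) = false := by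
      intro m
      rw [Bool.eq_false_iff]
      intro hmem
      rw [List.contains_iff_mem] at hmem
      rcases List.mem_map.mp hmem with ⟨k, hk, rfl⟩
      rw [PySem.List.mem_pyRange_one] at hk
      omega
    rw [runA_false p _ hfalse cs 0]
    simp [bpieces, PySem.Chars.join_singleton, PySem.List.slice_from cs (le_refl (0:Int))]
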